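-- pv_equiv track=rewrite | github.com/jeffhussmann/repair-seq | cluster.py | get_cluster_blocks
-- ===== SOURCE A (Python) =====
-- def get_cluster_blocks(cluster_assignments):
--     ''' tuples of inclusive index boundaries of connected blocks of cluster ids '''
--
--     cluster_ids = set(cluster_assignments)
--
--     cluster_blocks = {}
--
--     for cluster_id in cluster_ids:
--         idxs = [idx for idx, c_id in enumerate(cluster_assignments) if c_id == cluster_id]
--
--         if len(idxs) == 1:
--             blocks = [(idxs[0], idxs[0])]
--         else:
--             blocks = []
--             current_value = idxs[0]
--             block_start = current_value
--
--             for current_index in range(1, len(idxs)):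
--                 previous_value = current_value
--                 current_value = idxs[current_index]
--                 if current_value - previous_value == 1:
--                     continue
--                 else:
--                     block_end = idxs[current_index - 1]
--                     blocks.append((block_start, block_end))
--                     block_start = current_value
--
--             block_end = idxs[current_index]
--             blocks.append((block_start, block_end))
--
--         cluster_blocks[cluster_id] = blocks
--
--     return cluster_blocks
-- ===== SOURCE B (Python) =====
-- def get_cluster_blocks(cluster_assignments):
--     ''' tuples of inclusive index boundaries of connected blocks of cluster ids '''
--
--     cluster_blocks = {}
--
--     n = len(cluster_assignments)
--     i = 0
--     while i < n:
--         j = i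
--         while j + 1 < n and cluster_assignments[j + 1] == cluster_assignments[i]:
--             j += 1
--         cluster_blocks.setdefault(cluster_assignments[i], []).append((i, j))
--         i = j + 1
--
--     return cluster_blocks
-- ===== Notes on version B (the rewrite author's own statement) =====
-- stated objective: faster
-- what changed: A scans the whole list once per distinct cluster id (building each id's index list and then merging consecutive indices); B makes a single left-to-right pass that peels maximal runs of equal assignments and appends each run's (start,end) to its id's block list.
import Mathlib
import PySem

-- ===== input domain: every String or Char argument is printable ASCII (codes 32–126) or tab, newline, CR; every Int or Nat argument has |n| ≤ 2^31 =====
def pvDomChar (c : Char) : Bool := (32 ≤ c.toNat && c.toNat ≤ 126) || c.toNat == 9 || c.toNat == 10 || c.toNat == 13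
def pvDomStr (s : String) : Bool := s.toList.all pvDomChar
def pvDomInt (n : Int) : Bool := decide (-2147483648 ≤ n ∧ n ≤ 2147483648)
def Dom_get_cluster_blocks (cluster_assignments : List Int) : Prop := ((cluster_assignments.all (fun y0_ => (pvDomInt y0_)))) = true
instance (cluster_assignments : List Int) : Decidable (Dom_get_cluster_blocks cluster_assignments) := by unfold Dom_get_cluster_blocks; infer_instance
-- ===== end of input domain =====

-- B replaces A's one-full-scan-per-distinct-cluster-id strategy by a single left-to-right
-- pass that peels maximal runs of equal assignments (objective: faster).
-- NOTE on ordering: the Lean ports both list cluster ids in first-occurrence order; Python's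
-- `set` iteration order is interpreter-internal and the dict outputs are compared as dicts.

-- ===== PORT A =====
-- idxs = [idx for idx, c_id in enumerate(cluster_assignments) if c_id == cluster_id]
def pvIdxs (cluster_assignments : List Int) (cluster_id : Int) : List Int :=
  ((PySem.List.enumerate cluster_assignments 0).filter (fun p => p.2 == cluster_id)).map
    (fun p => p.1)

-- A's per-cluster-id block computation: the len(idxs)==1 branch, the index loop over
-- range(1, len(idxs)) with state (blocks, current_value, block_start), the trailing append.
-- (The pyGetD default 0 is never read: every index used is in range.)
def pvStepA (idxs : List Int) (s : List (Int × Int) × Int × Int) (current_index : Int) :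
    List (Int × Int) × Int × Int :=
  let previous_value := s.2.1
  let current_value := PySem.List.pyGetD idxs current_index 0
  if current_value - previous_value = 1 then
    (s.1, current_value, s.2.2)
  else
    (s.1 ++ [(s.2.2, PySem.List.pyGetD idxs (current_index - 1) 0)],
      current_value, current_value)

def pvBlocksOf (idxs : List Int) : List (Int × Int) :=
  if idxs.length = 1 then
    [(PySem.List.pyGetD idxs 0 0, PySem.List.pyGetD idxs 0 0)]
  else
    let st := (PySem.List.pyRange 1 (idxs.length : Int) 1).foldl (pvStepA idxs)
      ([], PySem.List.pyGetD idxs 0 0, PySem.List.pyGetD idxs 0 0)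
    st.1 ++ [(st.2.2, PySem.List.pyGetD idxs ((idxs.length : Int) - 1) 0)]

def get_cluster_blocks (cluster_assignments : List Int) : List (Int × List (Int × Int)) :=
  let cluster_ids := PySem.Set.ofList cluster_assignments
  (cluster_ids.foldl
    (fun d cluster_id => d.insert cluster_id (pvBlocksOf (pvIdxs cluster_assignments cluster_id)))
    (PySem.Dict.empty : PySem.Dict Int (List (Int × Int)))).items

-- ===== PORT B =====
-- inner while loop of B: length of the leading run of entries equal to v
def pvRunLen (v : Int) : List Int → Nat
  | [] => 0
  | y :: ys => if y = v then pvRunLen v ys + 1 else 0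

-- outer while loop of B: peel one maximal run, setdefault-append its (start, end) block
def pvBGo : List Int → Int → PySem.Dict Int (List (Int × Int)) → PySem.Dict Int (List (Int × Int))
  | [], _, d => d
  | x :: t, i, d =>
    let k := pvRunLen x t
    pvBGo (t.drop k) (i + (k : Int) + 1) (d.insert x (d.getD x [] ++ [(i, i + (k : Int))]))
termination_by l => l.length
decreasing_by simp

def get_cluster_blocks_alt (cluster_assignments : List Int) : List (Int × List (Int × Int)) :=
  (pvBGo cluster_assignments 0 PySem.Dict.empty).items

-- ===== PRECONDITION & SPEC =====
def Spec_get_cluster_blocks (cluster_assignments : List Int) (out : List (Int × List (Int × Int))) : Prop := out = get_cluster_blocks_alt cluster_assignments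
instance (cluster_assignments : List Int) (out : List (Int × List (Int × Int))) : Decidable (Spec_get_cluster_blocks cluster_assignments out) := by unfold Spec_get_cluster_blocks; infer_instance

-- ===== CLAIM (what is proved, stated in full; the proofs are below) =====
def Claim_equal_get_cluster_blocks : Prop := ∀ (cluster_assignments : List Int), Dom_get_cluster_blocks cluster_assignments → Spec_get_cluster_blocks cluster_assignments (get_cluster_blocks cluster_assignments)

-- ===== LEMMAS AND PROOFS =====

-- indices (counted from off) of the occurrences of v in a list
def pvIdxsO (off : Int) : List Int → Int → List Int
  | [], _ => []
  | y :: ys, v => if y = v then off :: pvIdxsO (off + 1) ys v else pvIdxsO (off + 1) ys v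

-- structural form of A's block-merging loop: goB block_start previous_value remaining
def pvGoB (bs p : Int) : List Int → List (Int × Int)
  | [] => [(bs, p)]
  | c :: rest => if c - p = 1 then pvGoB bs c rest else (bs, p) :: pvGoB c c rest

def pvMB : List Int → List (Int × Int)
  | [] => []
  | a :: rest => pvGoB a a rest

-- state-level structural form of A's index loop
def pvGoSt (acc : List (Int × Int)) (bs p : Int) : List Int → List (Int × Int) × Int × Int
  | [] => (acc, p, bs)
  | c :: rest => if c - p = 1 then pvGoSt acc bs c rest else pvGoSt (acc ++ [(bs, p)]) c c rest

def pvConsec (off : Int) : Nat → List Int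
  | 0 => []
  | k + 1 => off :: pvConsec (off + 1) k

def pvLookupD (c : List (Int × List (Int × Int))) (k : Int) : List (Int × Int) :=
  ((c.find? (fun p => p.1 == k)).map Prod.snd).getD []

-- association-list merge: append c's blocks to d's entries, then c's fresh keys
def pvMergeD : List (Int × List (Int × Int)) → List (Int × List (Int × Int)) → List (Int × List (Int × Int))
  | [], c => c
  | (k, v) :: D, c => (k, v ++ pvLookupD c k) :: pvMergeD D (c.filter (fun p => !(p.1 == k)))

-- setdefault-append on an association list
def pvInsA (D : List (Int × List (Int × Int))) (x : Int) (b : Int × Int) : List (Int × List (Int × Int)) :=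
  if D.any (fun p => p.1 == x) then
    D.map (fun p => if p.1 == x then (x, p.2 ++ [b]) else p)
  else D ++ [(x, [b])]

-- canonical value of A: per first-occurrence-ordered distinct id, merged blocks of its indices
def pvAForm (off : Int) (xs : List Int) : List (Int × List (Int × Int)) :=
  (PySem.Set.ofList xs).map (fun v => (v, pvMB (pvIdxsO off xs v)))

-- ---- A-side bridge ----
lemma pvIdxs_gen (xs : List Int) (v : Int) : ∀ s : Int,
    ((PySem.List.enumerate xs s).filter (fun p => p.2 == v)).map (fun p => p.1) = pvIdxsO s xs v := by
  induction xs with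
  | nil => intro s; simp [PySem.List.enumerate_nil, pvIdxsO]
  | cons y ys ih =>
    intro s
    rw [PySem.List.enumerate_cons]
    by_cases h : y = v
    · simp [h, pvIdxsO, ih]
    · simp [h, pvIdxsO, ih]

lemma pvIdxs_eq (xs : List Int) (v : Int) : pvIdxs xs v = pvIdxsO 0 xs v := pvIdxs_gen xs v 0

lemma pvGoSt_fold (l : List Int) : ∀ (i : Nat) (acc : List (Int × Int)) (bs p : Int),
    1 ≤ i → i ≤ l.length → p = l.getD (i - 1) 0 →
    ((PySem.List.pyRange (i : Int) (l.length : Int) 1).foldl (pvStepA l) (acc, p, bs))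
      = pvGoSt acc bs p (l.drop i) := by
  intro i
  generalize hn : l.length - i = n
  induction n generalizing i with
  | zero =>
    intro acc bs p h1 h2 _
    have hi : i = l.length := by omega
    subst hi
    rw [PySem.List.pyRange_one_eq_nil (by omega)]
    simp [pvGoSt]
  | succ n ih =>
    intro acc bs p h1 h2 hp
    have hilt : i < l.length := by omega
    rw [PySem.List.pyRange_one_cons (by exact_mod_cast hilt)]
    rw [List.foldl_cons]
    have hdrop : l.drop i = l[i] :: l.drop (i + 1) := List.drop_eq_getElem_cons hilt
    have hget : PySem.List.pyGetD l (i : Int) 0 = l[i] := by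
      rw [PySem.List.pyGetD_natCast]
      exact List.getD_eq_getElem l 0 hilt
    have hget1 : PySem.List.pyGetD l ((i : Int) - 1) 0 = p := by
      have : (i : Int) - 1 = ((i - 1 : Nat) : Int) := by omega
      rw [this, PySem.List.pyGetD_natCast, hp]
    have hcast : ((i : Int) + 1) = ((i + 1 : Nat) : Int) := by push_cast; ring
    have hgd : l[i] = l.getD ((i + 1) - 1) 0 := by
      simp [List.getD_eq_getElem?_getD, List.getElem?_eq_getElem hilt]
    by_cases hb : l[i] - p = 1
    · have hstep : pvStepA l (acc, p, bs) (i : Int) = (acc, l[i], bs) := by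
        simp [pvStepA, hget, hb]
      rw [hstep, hcast, ih (i + 1) (by omega) acc bs l[i] (by omega) (by omega) hgd, hdrop]
      simp [pvGoSt, hb]
    · have hstep : pvStepA l (acc, p, bs) (i : Int) = (acc ++ [(bs, p)], l[i], l[i]) := by
        simp [pvStepA, hget, hget1, hb]
      rw [hstep, hcast,
        ih (i + 1) (by omega) (acc ++ [(bs, p)]) l[i] l[i] (by omega) (by omega) hgd, hdrop]
      simp [pvGoSt, hb]

lemma pvGoSt_spec : ∀ (rest : List Int) (acc : List (Int × Int)) (bs p : Int),
    (pvGoSt acc bs p rest).1 ++ [((pvGoSt acc bs p rest).2.2, (p :: rest).getLastD 0)]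
      = acc ++ pvGoB bs p rest := by
  intro rest
  induction rest with
  | nil => intro acc bs p; simp [pvGoSt, pvGoB]
  | cons c r ih =>
    intro acc bs p
    by_cases h : c - p = 1
    · simpa [pvGoSt, pvGoB, h] using ih acc bs c
    · simpa [pvGoSt, pvGoB, h] using ih (acc ++ [(bs, p)]) c c

lemma pvGetD_last (l : List Int) (hne : l ≠ []) :
    PySem.List.pyGetD l ((l.length : Int) - 1) 0 = l.getLastD 0 := by
  have hlen : 0 < l.length := List.length_pos_iff.mpr hne
  have : (l.length : Int) - 1 = ((l.length - 1 : Nat) : Int) := by omega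
  rw [this, PySem.List.pyGetD_natCast]
  rw [List.getD_eq_getElem?_getD, List.getLastD_eq_getLast?, List.getLast?_eq_getElem?]

lemma pvBlocksOf_eq_pvMB (a : Int) (rest : List Int) :
    pvBlocksOf (a :: rest) = pvGoB a a rest := by
  cases rest with
  | nil => simp [pvBlocksOf, pvGoB, PySem.List.pyGetD]
  | cons r rest' =>
    have hlen : (a :: r :: rest').length ≠ 1 := by simp
    unfold pvBlocksOf
    rw [if_neg hlen]
    have hget0 : PySem.List.pyGetD (a :: r :: rest') (0 : Int) 0 = a := by
      simp [PySem.List.pyGetD]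
    simp only [hget0]
    have hf := pvGoSt_fold (a :: r :: rest') 1 [] a a (by omega) (by simp) (by simp)
    push_cast at hf
    rw [hf]
    have hdrop : (a :: r :: rest').drop 1 = r :: rest' := by simp
    rw [hdrop]
    have hlast : PySem.List.pyGetD (a :: r :: rest') (((a :: r :: rest').length : Int) - 1) 0
        = ((a : Int) :: r :: rest').getLastD 0 := pvGetD_last _ (by simp)
    rw [hlast]
    have := pvGoSt_spec (r :: rest') [] a a
    simpa using this

lemma pvIdxsO_ne_nil {off : Int} {xs : List Int} {v : Int} (h : v ∈ xs) :
    pvIdxsO off xs v ≠ [] := by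
  induction xs generalizing off with
  | nil => simp at h
  | cons y ys ih =>
    by_cases hy : y = v
    · simp [pvIdxsO, hy]
    · rcases List.mem_cons.mp h with h1 | h1
      · exact absurd h1.symm hy
      · simpa [pvIdxsO, hy] using ih h1

lemma pvIdxsO_nil_of_not_mem {off : Int} {xs : List Int} {v : Int} (h : v ∉ xs) :
    pvIdxsO off xs v = [] := by
  induction xs generalizing off with
  | nil => simp [pvIdxsO]
  | cons y ys ih =>
    have hy : y ≠ v := fun hc => h (by simp [hc])
    have hv : v ∉ ys := fun hc => h (by simp [hc])
    simpa [pvIdxsO, hy] using ih hv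

lemma portA_eq_pvAForm (xs : List Int) : get_cluster_blocks xs = pvAForm 0 xs := by
  unfold get_cluster_blocks
  rw [PySem.Dict.items_foldl_insert_fresh (PySem.Set.ofList xs) (fun a => a)
    (fun a => pvBlocksOf (pvIdxs xs a)) PySem.Dict.empty
    (fun a _ => rfl) (by simp [PySem.Set.nodup_ofList])]
  rw [show (PySem.Dict.empty : PySem.Dict Int (List (Int × Int))).items = [] from rfl,
    List.nil_append]
  apply List.map_congr_left
  intro v hv
  have hvx : v ∈ xs := (PySem.Set.mem_ofList xs v).mp hv
  have h1 : pvBlocksOf (pvIdxs xs v) = pvMB (pvIdxsO 0 xs v) := by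
    rw [pvIdxs_eq]
    cases hcase : pvIdxsO 0 xs v with
    | nil => exact absurd hcase (pvIdxsO_ne_nil hvx)
    | cons a rest => rw [pvBlocksOf_eq_pvMB]; rfl
  rw [h1]

-- ---- run-peeling facts ----
lemma pvRunLen_take (x : Int) (t : List Int) : t.take (pvRunLen x t) = List.replicate (pvRunLen x t) x := by
  induction t with
  | nil => simp [pvRunLen]
  | cons y ys ih =>
    by_cases hy : y = x
    · simp [pvRunLen, hy, List.replicate_succ, ih]
    · simp [pvRunLen, hy]

lemma pvRunLen_drop_head (x : Int) (t : List Int) :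
    ∀ h ∈ (t.drop (pvRunLen x t)).head?, h ≠ x := by
  induction t with
  | nil => simp
  | cons y ys ih =>
    by_cases hy : y = x
    · simpa [pvRunLen, hy] using ih
    · simp [pvRunLen, hy]

-- ---- ofList peel ----
lemma pvOfList_foldl (l : List Int) : ∀ (s : List Int), s.Nodup →
    l.foldl PySem.Set.add s = s ++ (PySem.Set.ofList l).filter (fun y => !(s.contains y)) := by
  induction l with
  | nil => intro s _; simp [PySem.Set.ofList]
  | cons y l ih =>
    intro s hs
    have hofl : PySem.Set.ofList (y :: l) = y :: (PySem.Set.ofList l).filter (fun a => !([y].contains a)) := by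
      have h1 : PySem.Set.ofList (y :: l) = l.foldl PySem.Set.add [y] := by
        rw [PySem.Set.ofList_eq_foldl]
        simp [List.foldl_cons, PySem.Set.add]
      rw [h1, ih [y] (by simp)]
      simp
    rw [List.foldl_cons]
    by_cases hy : y ∈ s
    · rw [PySem.Set.add_of_mem hy, ih s hs, hofl]
      congr 1
      rw [List.filter_cons]
      have : (!(s.contains y)) = false := by simp [hy]
      rw [this]
      simp only [List.filter_filter]
      apply List.filter_congr
      intro a _
      by_cases ha : a ∈ s
      · simp [ha]
      · have : a ≠ y := fun hc => ha (hc ▸ hy)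
        simp [ha, this]
    · have nod : (s ++ [y]).Nodup := by
        rw [List.nodup_append]
        refine ⟨hs, by simp, ?_⟩
        intro a has b hb hab
        rw [List.mem_singleton] at hb
        exact hy ((hab.trans hb) ▸ has)
      rw [PySem.Set.add_of_not_mem hy, ih (s ++ [y]) nod, hofl, List.filter_cons]
      have hky : (!(s.contains y)) = true := by simp [hy]
      rw [hky]
      simp only [if_true, List.append_assoc, List.cons_append, List.nil_append]
      congr 2
      simp only [List.filter_filter]
      apply List.filter_congr
      intro a _
      by_cases ha : a ∈ s <;> by_cases hay : a = y <;> simp [ha, hay, hy]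

lemma pvOfList_cons (x : Int) (l : List Int) :
    PySem.Set.ofList (x :: l) = x :: (PySem.Set.ofList l).filter (fun y => !(y == x)) := by
  have h1 : PySem.Set.ofList (x :: l) = l.foldl PySem.Set.add [x] := by
    rw [PySem.Set.ofList_eq_foldl]
    simp [List.foldl_cons, PySem.Set.add]
  rw [h1, pvOfList_foldl l [x] (by simp), List.singleton_append]
  congr 1
  apply List.filter_congr
  intro a _
  by_cases h : a = x <;> simp [h]

lemma pvOfList_replicate (k : Nat) (x : Int) (ys : List Int) :
    PySem.Set.ofList (List.replicate (k + 1) x ++ ys)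
      = x :: (PySem.Set.ofList ys).filter (fun y => !(y == x)) := by
  induction k with
  | zero => simpa using pvOfList_cons x ys
  | succ k ih =>
    rw [List.replicate_succ, List.cons_append, pvOfList_cons, ih]
    simp [List.filter_filter]

-- ---- idxsO peel ----
lemma pvIdxsO_replicate_self (k : Nat) (x : Int) (ys : List Int) : ∀ off,
    pvIdxsO off (List.replicate k x ++ ys) x = pvConsec off k ++ pvIdxsO (off + k) ys x := by
  induction k with
  | zero => intro off; simp [pvConsec]
  | succ k ih =>
    intro off
    have harith : off + 1 + (k : Int) = off + ((k + 1 : Nat) : Int) := by push_cast; ring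
    rw [List.replicate_succ, List.cons_append]
    show pvIdxsO off (x :: (List.replicate k x ++ ys)) x = _
    rw [show pvIdxsO off (x :: (List.replicate k x ++ ys)) x
        = off :: pvIdxsO (off + 1) (List.replicate k x ++ ys) x from by simp [pvIdxsO]]
    rw [ih (off + 1), harith]
    simp [pvConsec]

lemma pvIdxsO_replicate_ne (k : Nat) (x : Int) (ys : List Int) {v : Int} (hv : v ≠ x) : ∀ off,
    pvIdxsO off (List.replicate k x ++ ys) v = pvIdxsO (off + k) ys v := by
  induction k with
  | zero => intro off; simp
  | succ k ih =>
    intro off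
    have harith : off + 1 + (k : Int) = off + ((k + 1 : Nat) : Int) := by push_cast; ring
    rw [List.replicate_succ, List.cons_append]
    rw [show pvIdxsO off (x :: (List.replicate k x ++ ys)) v
        = pvIdxsO (off + 1) (List.replicate k x ++ ys) v from by
          have hxv : x ≠ v := Ne.symm hv
          simp [pvIdxsO, hxv]]
    rw [ih (off + 1), harith]

lemma pvIdxsO_mem_le {off : Int} {xs : List Int} {v e : Int} (h : e ∈ pvIdxsO off xs v) :
    off ≤ e := by
  induction xs generalizing off with
  | nil => simp [pvIdxsO] at h
  | cons y ys ih =>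
    by_cases hy : y = v
    · rcases (by simpa [pvIdxsO, hy] using h : e = off ∨ e ∈ pvIdxsO (off + 1) ys v) with h1 | h1
      · omega
      · have := ih h1; omega
    · have := ih (by simpa [pvIdxsO, hy] using h); omega

-- ---- block merging over a run ----
lemma pvGoB_consec (k : Nat) : ∀ (bs p : Int) (rest : List Int),
    pvGoB bs p (pvConsec (p + 1) k ++ rest) = pvGoB bs (p + k) rest := by
  induction k with
  | zero => intro bs p rest; simp [pvConsec]
  | succ k ih =>
    intro bs p rest
    have harith : p + 1 + (k : Int) = p + ((k + 1 : Nat) : Int) := by push_cast; ring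
    have : pvGoB bs p (pvConsec (p + 1) (k + 1) ++ rest)
        = pvGoB bs (p + 1) (pvConsec ((p + 1) + 1) k ++ rest) := by
      simp [pvConsec, pvGoB]
    rw [this, ih, harith]

lemma pvMB_consec (off : Int) (k : Nat) (rest : List Int)
    (h : ∀ e ∈ rest, off + k + 2 ≤ e) :
    pvMB (pvConsec off (k + 1) ++ rest) = (off, off + (k : Int)) :: pvMB rest := by
  have h1 : pvMB (pvConsec off (k + 1) ++ rest) = pvGoB off (off + k) rest := by
    simp only [pvConsec, List.cons_append, pvMB]
    exact pvGoB_consec k off off rest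
  rw [h1]
  cases rest with
  | nil => simp [pvGoB, pvMB]
  | cons c r =>
    have hc : off + k + 2 ≤ c := h c (by simp)
    have : ¬ (c - (off + k) = 1) := by omega
    simp [pvGoB, this, pvMB]

-- ---- lookup lemmas ----
lemma pvLookupD_map_of_mem {l : List Int} {x : Int} (f : Int → List (Int × Int)) (h : x ∈ l) :
    pvLookupD (l.map (fun v => (v, f v))) x = f x := by
  induction l with
  | nil => simp at h
  | cons y l ih =>
    by_cases hy : y = x
    · subst hy; simp [pvLookupD]
    · rcases List.mem_cons.mp h with h1 | h1
      · exact absurd h1.symm hy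
      · have := ih h1
        simpa [pvLookupD, List.find?_cons, hy] using this

lemma pvLookupD_map_of_not_mem {l : List Int} {x : Int} (f : Int → List (Int × Int)) (h : x ∉ l) :
    pvLookupD (l.map (fun v => (v, f v))) x = [] := by
  induction l with
  | nil => simp [pvLookupD]
  | cons y l ih =>
    have hy : y ≠ x := fun hc => h (by simp [hc])
    have hl : x ∉ l := fun hc => h (by simp [hc])
    simpa [pvLookupD, List.find?_cons, hy] using ih hl

lemma pvLookupD_cons (p : Int × List (Int × Int)) (c : List (Int × List (Int × Int))) (k : Int) :
    pvLookupD (p :: c) k = if p.1 = k then p.2 else pvLookupD c k := by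
  by_cases h : p.1 = k <;> simp [pvLookupD, h]

lemma pvLookupD_filter_ne {c : List (Int × List (Int × Int))} {x k : Int} (h : k ≠ x) :
    pvLookupD (c.filter (fun p => !(p.1 == x))) k = pvLookupD c k := by
  induction c with
  | nil => rfl
  | cons p c ih =>
    by_cases hp : p.1 = x
    · have hpk : p.1 ≠ k := fun hc => h (hc.symm.trans hp)
      rw [List.filter_cons, show (!(p.1 == x)) = false from by simp [hp]]
      simp only [Bool.false_eq_true, if_false]
      rw [ih, pvLookupD_cons, if_neg hpk]
    · rw [List.filter_cons, show (!(p.1 == x)) = true from by simp [hp]]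
      simp only [if_true]
      rw [pvLookupD_cons, pvLookupD_cons, ih]

-- ---- AForm peel ----
lemma pvAForm_peel (off : Int) (k : Nat) (x : Int) (ys : List Int)
    (hhd : ∀ h ∈ ys.head?, h ≠ x) :
    pvAForm off (List.replicate (k + 1) x ++ ys)
      = (x, (off, off + (k : Int)) :: pvLookupD (pvAForm (off + k + 1) ys) x)
        :: (pvAForm (off + k + 1) ys).filter (fun p => !(p.1 == x)) := by
  have hcast : off + ((k + 1 : Nat) : Int) = off + k + 1 := by push_cast; ring
  have hx_idxs : pvIdxsO off (List.replicate (k + 1) x ++ ys) x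
      = pvConsec off (k + 1) ++ pvIdxsO (off + k + 1) ys x := by
    rw [pvIdxsO_replicate_self (k + 1) x ys off, hcast]
  have hbound : ∀ e ∈ pvIdxsO (off + k + 1) ys x, off + k + 2 ≤ e := by
    cases ys with
    | nil => intro e he; simp [pvIdxsO] at he
    | cons y t =>
      intro e he
      have hyx : y ≠ x := hhd y (by simp)
      rw [show pvIdxsO (off + k + 1) (y :: t) x = pvIdxsO (off + k + 1 + 1) t x from by
        simp [pvIdxsO, hyx]] at he
      have := pvIdxsO_mem_le he
      omega
  have hlook : pvLookupD ((PySem.Set.ofList ys).map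
        (fun v => (v, pvMB (pvIdxsO (off + k + 1) ys v)))) x
      = pvMB (pvIdxsO (off + k + 1) ys x) := by
    by_cases hmem : x ∈ PySem.Set.ofList ys
    · exact pvLookupD_map_of_mem _ hmem
    · rw [pvLookupD_map_of_not_mem _ hmem]
      rw [pvIdxsO_nil_of_not_mem (fun hc => hmem ((PySem.Set.mem_ofList ys x).mpr hc))]
      rfl
  unfold pvAForm
  rw [pvOfList_replicate, List.map_cons]
  congr 1
  · rw [hx_idxs, pvMB_consec off k _ hbound, hlook]
  · rw [List.filter_map]
    apply List.map_congr_left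
    intro v hv
    have hvne : v ≠ x := by
      rcases List.mem_filter.mp hv with ⟨_, h2⟩
      simpa using h2
    rw [pvIdxsO_replicate_ne (k + 1) x ys hvne off, hcast]

-- ---- merge algebra ----
lemma pvMergeD_nil_right (D : List (Int × List (Int × Int))) : pvMergeD D [] = D := by
  induction D with
  | nil => rfl
  | cons p D ih => simp [pvMergeD, pvLookupD, ih]

lemma pvMergeD_insA (x : Int) (b : Int × Int) :
    ∀ (D : List (Int × List (Int × Int))) (c : List (Int × List (Int × Int))),
    (D.map Prod.fst).Nodup →
    pvMergeD (pvInsA D x b) c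
      = pvMergeD D ((x, b :: pvLookupD c x) :: c.filter (fun p => !(p.1 == x))) := by
  intro D
  induction D with
  | nil =>
    intro c _
    rw [show pvInsA [] x b = [(x, [b])] from rfl]
    rw [show pvMergeD [(x, [b])] c
        = (x, [b] ++ pvLookupD c x) :: pvMergeD [] (c.filter (fun p => !(p.1 == x))) from rfl]
    rfl
  | cons q D ih =>
    intro c hnd
    obtain ⟨hq, hD⟩ : q.1 ∉ D.map Prod.fst ∧ (D.map Prod.fst).Nodup := by
      simpa using hnd
    by_cases hqx : q.1 = x
    · have hmap : D.map (fun p => if p.1 == x then (x, p.2 ++ [b]) else p) = D := by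
        have hpt : ∀ p ∈ D, (if p.1 == x then (x, p.2 ++ [b]) else p) = id p := by
          intro p hp
          have : p.1 ≠ x := fun hc => hq (hqx ▸ hc ▸ List.mem_map_of_mem hp)
          simp [this]
        exact (List.map_congr_left hpt).trans (List.map_id D)
      have hins : pvInsA (q :: D) x b = (x, q.2 ++ [b]) :: D := by
        unfold pvInsA
        rw [if_pos (by simp [hqx])]
        rw [List.map_cons, if_pos (by simp [hqx]), hmap]
      rw [hins]
      rw [show pvMergeD ((x, q.2 ++ [b]) :: D) c
          = (x, (q.2 ++ [b]) ++ pvLookupD c x) :: pvMergeD D (c.filter (fun p => !(p.1 == x)))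
          from rfl]
      have hq2 : q = (x, q.2) := by rw [← hqx]
      rw [show pvMergeD (q :: D) ((x, b :: pvLookupD c x) :: c.filter (fun p => !(p.1 == x)))
          = (q.1, q.2 ++ pvLookupD ((x, b :: pvLookupD c x) :: c.filter (fun p => !(p.1 == x))) q.1)
            :: pvMergeD D (((x, b :: pvLookupD c x) :: c.filter (fun p => !(p.1 == x))).filter
              (fun p => !(p.1 == q.1))) from rfl]
      rw [hqx]
      rw [pvLookupD_cons]
      rw [if_pos rfl]
      rw [List.filter_cons, show (!((x : Int) == x)) = false from by simp]
      simp only [Bool.false_eq_true, if_false]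
      rw [List.filter_filter]
      congr 1
      · simp [List.append_assoc]
      · congr 1
        apply List.filter_congr
        intro p _
        by_cases hpx : p.1 = x <;> simp [hpx]
    · have hins : pvInsA (q :: D) x b = q :: pvInsA D x b := by
        unfold pvInsA
        by_cases hany : D.any (fun p => p.1 == x)
        · rw [if_pos (by simp [hany]), if_pos hany, List.map_cons, if_neg (by simp [hqx])]
        · rw [if_neg (by simp [hqx, hany]), if_neg (by simpa using hany), List.cons_append]
      rw [hins]
      rw [show pvMergeD (q :: pvInsA D x b) c
          = (q.1, q.2 ++ pvLookupD c q.1) :: pvMergeD (pvInsA D x b) (c.filter (fun p => !(p.1 == q.1)))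
          from rfl]
      rw [show pvMergeD (q :: D) ((x, b :: pvLookupD c x) :: c.filter (fun p => !(p.1 == x)))
          = (q.1, q.2 ++ pvLookupD ((x, b :: pvLookupD c x) :: c.filter (fun p => !(p.1 == x))) q.1)
            :: pvMergeD D (((x, b :: pvLookupD c x) :: c.filter (fun p => !(p.1 == x))).filter
              (fun p => !(p.1 == q.1))) from rfl]
      have hql : pvLookupD ((x, b :: pvLookupD c x) :: c.filter (fun p => !(p.1 == x))) q.1
          = pvLookupD c q.1 := by
        rw [pvLookupD_cons, if_neg (fun hc => hqx hc.symm), pvLookupD_filter_ne hqx]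
      rw [hql]
      congr 1
      rw [List.filter_cons, show (!((x : Int) == q.1)) = true from by
        have hne : x ≠ q.1 := fun hc => hqx hc.symm
        simp [hne]]
      simp only [if_true]
      rw [ih (c.filter (fun p => !(p.1 == q.1))) hD]
      rw [pvLookupD_filter_ne (fun hc : x = q.1 => hqx hc.symm)]
      congr 2
      rw [List.filter_filter, List.filter_filter]
      apply List.filter_congr
      intro p _
      exact Bool.and_comm _ _

-- ---- Dict-items bridges ----
lemma pvInsert_items (d : PySem.Dict Int (List (Int × Int))) (x : Int) (b : Int × Int)
    (h : d.keys.Nodup) :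
    (d.insert x (d.getD x [] ++ [b])).items = pvInsA d.items x b := by
  have hco : d.contains x = d.items.any (fun p => p.1 == x) := by
    rw [PySem.Dict.contains_eq_decide_mem_keys]
    rcases hh : d.items.any (fun p => p.1 == x) with _ | _
    · simp only [List.any_eq_false] at hh
      simp only [decide_eq_false_iff_not, PySem.Dict.keys, List.mem_map]
      rintro ⟨p, hp, hpx⟩
      exact absurd (by simpa using hpx) (by simpa using hh p hp)
    · simp only [List.any_eq_true] at hh
      obtain ⟨p, hp, hpx⟩ := hh
      simp only [decide_eq_true_eq, PySem.Dict.keys, List.mem_map]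
      exact ⟨p, hp, by simpa using hpx⟩
  rw [PySem.Dict.items_insert]
  unfold pvInsA
  by_cases hany : d.items.any (fun p => p.1 == x)
  · rw [if_pos (by rw [hco]; exact hany), if_pos hany]
    apply List.map_congr_left
    intro p hp
    by_cases hpx : p.1 = x
    · rw [if_pos (by simp [hpx]), if_pos (by simp [hpx])]
      have hpd : d.getD x [] = p.2 := by
        have hmem : (x, p.2) ∈ d.items := by
          have : p = (x, p.2) := by rw [← hpx]
          exact this ▸ hp
        have := (PySem.Dict.get?_eq_some_iff_mem_items d x p.2 h).mpr hmem
        simp [PySem.Dict.getD, this]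
      rw [hpd]
    · rw [if_neg (by simp [hpx]), if_neg (by simp [hpx])]
  · rw [if_neg (by rw [hco]; exact hany), if_neg hany]
    have : d.getD x [] = [] := by
      have hc : d.contains x = false := by rw [hco]; exact eq_false_of_ne_true hany
      exact PySem.Dict.getD_of_not_contains d [] hc
    rw [this]
    rfl

lemma pvInsert_keys_nodup (d : PySem.Dict Int (List (Int × Int))) (x : Int) (w : List (Int × Int))
    (h : d.keys.Nodup) : (d.insert x w).keys.Nodup := by
  have h2 := PySem.Dict.nodup_keys_foldl_insert [x] (fun _ _ => w) d h
  simpa using h2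

-- ---- main invariant ----
lemma pvBGo_items : ∀ (n : Nat) (xs : List Int) (off : Int) (d : PySem.Dict Int (List (Int × Int))),
    xs.length ≤ n → d.keys.Nodup →
    (pvBGo xs off d).items = pvMergeD d.items (pvAForm off xs) := by
  intro n
  induction n with
  | zero =>
    intro xs off d hlen _
    have hxs : xs = [] := List.length_eq_zero_iff.mp (by omega)
    subst hxs
    rw [show pvBGo [] off d = d from by rw [pvBGo]]
    rw [show pvAForm off [] = [] from rfl, pvMergeD_nil_right]
  | succ n ih =>
    intro xs off d hlen hnd
    cases xs with
    | nil =>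
      rw [show pvBGo [] off d = d from by rw [pvBGo]]
      rw [show pvAForm off [] = [] from rfl, pvMergeD_nil_right]
    | cons x t =>
      have htk : t = List.replicate (pvRunLen x t) x ++ t.drop (pvRunLen x t) := by
        conv_lhs => rw [← List.take_append_drop (pvRunLen x t) t]
        rw [pvRunLen_take]
      have hstep : pvBGo (x :: t) off d
          = pvBGo (t.drop (pvRunLen x t)) (off + (pvRunLen x t : Int) + 1)
            (d.insert x (d.getD x [] ++ [(off, off + (pvRunLen x t : Int))])) := by
        rw [pvBGo]
      rw [hstep]
      rw [ih (t.drop (pvRunLen x t)) (off + (pvRunLen x t : Int) + 1) _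
        (by have := List.length_drop (l := t) (i := pvRunLen x t); simp at hlen ⊢; omega)
        (pvInsert_keys_nodup d x _ hnd)]
      rw [pvInsert_items d x (off, off + (pvRunLen x t : Int)) hnd]
      rw [pvMergeD_insA x (off, off + (pvRunLen x t : Int)) d.items _
        (by simpa [PySem.Dict.keys] using hnd)]
      congr 1
      rw [show (x :: t) = List.replicate (pvRunLen x t + 1) x ++ t.drop (pvRunLen x t) from by
        rw [List.replicate_succ, List.cons_append, ← htk]]
      rw [pvAForm_peel off (pvRunLen x t) x (t.drop (pvRunLen x t)) (pvRunLen_drop_head x t)]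

lemma portB_eq_pvAForm (xs : List Int) : get_cluster_blocks_alt xs = pvAForm 0 xs := by
  unfold get_cluster_blocks_alt
  rw [pvBGo_items xs.length xs 0 PySem.Dict.empty le_rfl List.nodup_nil]
  rfl

-- ===== VERDICT (by name: the statement is the Claim_ definition above) =====
theorem get_cluster_blocks_spec : Claim_equal_get_cluster_blocks := by
  intro xs _
  unfold Spec_get_cluster_blocks
  rw [portA_eq_pvAForm, portB_eq_pvAForm]
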